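-- pv_equiv track=rewrite | github.com/RESMP-DEV/metal-marlin | metal_marlin/distributed/pipeline_parallel.py | assign_layers_to_stages
-- ===== SOURCE A (Python) =====
-- def assign_layers_to_stages(
--     num_layers: int,
--     num_stages: int,
--     strategy: str = "uniform",
-- ) -> list[tuple[int, int]]:
--     """Assign layer ranges to pipeline stages.
--
--     Args:
--         num_layers: Total number of layers
--         num_stages: Number of pipeline stages
--         strategy: Assignment strategy
--             - "uniform": Equal layers per stage
--             - "memory_balanced": Balance based on estimated memory
--
--     Returns:
--         List of (start_layer, end_layer) tuples for each stage
--     """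
--     if strategy == "uniform":
--         layers_per_stage = num_layers // num_stages
--         remainder = num_layers % num_stages
--
--         ranges = []
--         start = 0
--         for i in range(num_stages):
--             n = layers_per_stage + (1 if i < remainder else 0)
--             ranges.append((start, start + n))
--             start += n
--         return ranges
--
--     elif strategy == "memory_balanced":
--         # For memory balancing, we'd need actual weight sizes
--         # Fall back to uniform for now
--         return assign_layers_to_stages(num_layers, num_stages, "uniform")
--
--     else:
--         raise ValueError(f"Unknown strategy: {strategy}")
-- ===== SOURCE B (Python) =====
-- def assign_layers_to_stages(
--     num_layers: int,
--     num_stages: int,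
--     strategy: str = "uniform",
-- ) -> list[tuple[int, int]]:
--     if strategy == "memory_balanced":
--         # no weight sizes available: fall back to uniform
--         return assign_layers_to_stages(num_layers, num_stages, "uniform")
--     if strategy != "uniform":
--         raise ValueError(f"Unknown strategy: {strategy}")
--     q, r = divmod(num_layers, num_stages)
--     def boundary(i):
--         return i * q + min(i, r)
--     return [(boundary(i), boundary(i + 1)) for i in range(num_stages)]
-- ===== Notes on version B (the rewrite author's own statement) =====
-- stated objective: alternative
-- what changed: Replaces the running-start accumulator loop with a stateless closed-form boundary formula boundary(i) = i*q + min(i, r) and builds each stage range directly by a comprehension.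
import Mathlib
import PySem

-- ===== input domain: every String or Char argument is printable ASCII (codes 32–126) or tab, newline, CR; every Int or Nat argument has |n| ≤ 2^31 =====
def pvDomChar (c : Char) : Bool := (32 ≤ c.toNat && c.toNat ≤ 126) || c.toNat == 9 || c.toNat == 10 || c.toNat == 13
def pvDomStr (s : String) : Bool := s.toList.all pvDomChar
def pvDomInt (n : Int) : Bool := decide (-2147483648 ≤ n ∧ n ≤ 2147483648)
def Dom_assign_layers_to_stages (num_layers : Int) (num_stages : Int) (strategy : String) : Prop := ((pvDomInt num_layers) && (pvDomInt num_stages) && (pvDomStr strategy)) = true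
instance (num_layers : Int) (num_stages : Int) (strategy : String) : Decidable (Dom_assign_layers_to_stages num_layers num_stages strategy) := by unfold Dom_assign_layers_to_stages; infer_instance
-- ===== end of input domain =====

-- B replaces A's running-start accumulator loop by the stateless closed-form
-- boundary formula i*q + min(i, r); same cost, different decomposition.

-- ===== PORT A =====
def assign_layers_to_stages (num_layers : Int) (num_stages : Int) (strategy : String) : List (Int × Int) :=
  if strategy = "uniform" then
    let layers_per_stage := PySem.Int.floordiv num_layers num_stages
    let remainder := PySem.Int.mod num_layers num_stages
    (((PySem.List.pyRange 0 num_stages 1).foldl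
      (fun (st : List (Int × Int) × Int) i =>
        let n := layers_per_stage + (if i < remainder then 1 else 0)
        (st.1 ++ [(st.2, st.2 + n)], st.2 + n))
      ([], 0))).1
  else if strategy = "memory_balanced" then
    assign_layers_to_stages num_layers num_stages "uniform"
  else
    []  -- Python raises ValueError here; excluded by Pre_
termination_by (if strategy = "memory_balanced" then 1 else 0)
decreasing_by simp_all

-- ===== PORT B =====
def pvBoundary (q r i : Int) : Int := i * q + min i r

def assign_layers_to_stages_alt (num_layers : Int) (num_stages : Int) (strategy : String) : List (Int × Int) :=
  if strategy = "memory_balanced" then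
    assign_layers_to_stages_alt num_layers num_stages "uniform"
  else if strategy ≠ "uniform" then
    []  -- Python raises ValueError here; excluded by Pre_
  else
    let q := PySem.Int.floordiv num_layers num_stages
    let r := PySem.Int.mod num_layers num_stages
    (PySem.List.pyRange 0 num_stages 1).map
      (fun i => (pvBoundary q r i, pvBoundary q r (i + 1)))
termination_by (if strategy = "memory_balanced" then 1 else 0)
decreasing_by simp_all

-- ===== PRECONDITION & SPEC =====
-- Pre_ excludes exactly the inputs where Python A raises: num_stages = 0
-- (ZeroDivisionError) and strategies other than "uniform"/"memory_balanced" (ValueError).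
def Pre_assign_layers_to_stages (num_layers : Int) (num_stages : Int) (strategy : String) : Prop :=
  (strategy = "uniform" ∨ strategy = "memory_balanced") ∧ num_stages ≠ 0
instance (num_layers : Int) (num_stages : Int) (strategy : String) : Decidable (Pre_assign_layers_to_stages num_layers num_stages strategy) := by unfold Pre_assign_layers_to_stages; infer_instance
def pvWitness_assign_layers_to_stages : Int × Int × String := (10, 3, "uniform")

def Spec_assign_layers_to_stages (num_layers : Int) (num_stages : Int) (strategy : String) (out : List (Int × Int)) : Prop := out = assign_layers_to_stages_alt num_layers num_stages strategy
instance (num_layers : Int) (num_stages : Int) (strategy : String) (out : List (Int × Int)) : Decidable (Spec_assign_layers_to_stages num_layers num_stages strategy out) := by unfold Spec_assign_layers_to_stages; infer_instance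

-- ===== CLAIM (what is proved, stated in full; the proofs are below) =====
def Claim_equal_assign_layers_to_stages : Prop := ∀ (num_layers : Int) (num_stages : Int) (strategy : String), Dom_assign_layers_to_stages num_layers num_stages strategy → Pre_assign_layers_to_stages num_layers num_stages strategy → Spec_assign_layers_to_stages num_layers num_stages strategy (assign_layers_to_stages num_layers num_stages strategy)

-- ===== LEMMAS AND PROOFS =====

-- one fold step moves the running start from boundary m to boundary (m+1)
lemma pvBoundary_step (q r : Int) (m : Int) :
    pvBoundary q r m + (q + (if m < r then 1 else 0)) = pvBoundary q r (m + 1) := by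
  unfold pvBoundary
  have h : (m + 1) * q = m * q + q := by ring
  split_ifs <;> omega

-- the accumulator fold over range m produces exactly the closed-form ranges,
-- with running start = pvBoundary q r m
lemma pv_fold_closed (q r : Int) (hr : 0 ≤ r) (m : Nat) :
    (((List.range m).map (fun (k : Nat) => (k : Int))).foldl
      (fun (st : List (Int × Int) × Int) i =>
        let n := q + (if i < r then 1 else 0)
        (st.1 ++ [(st.2, st.2 + n)], st.2 + n)) ([], 0))
    = (((List.range m).map (fun (k : Nat) => (k : Int))).map
        (fun i => (pvBoundary q r i, pvBoundary q r (i + 1))), pvBoundary q r m) := by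
  induction m with
  | zero => simp [pvBoundary]; omega
  | succ m ih =>
    rw [List.range_succ, List.map_append, List.foldl_append, ih, List.map_append]
    have hstep := pvBoundary_step q r (m : Int)
    refine Prod.ext ?_ ?_ <;> simp <;> omega

-- A's accumulator loop equals B's closed form on the "uniform" strategy
lemma pv_uniform_eq (nl ns : Int) :
    assign_layers_to_stages nl ns "uniform" = assign_layers_to_stages_alt nl ns "uniform" := by
  rw [assign_layers_to_stages, assign_layers_to_stages_alt]
  rw [if_pos rfl, if_neg (by decide : ¬("uniform" = "memory_balanced")),
      if_neg (by decide : ¬("uniform" ≠ "uniform"))]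
  rw [PySem.List.pyRange_one]
  simp only [zero_add]
  rcases lt_trichotomy ns 0 with h | h | h
  · have h0 : (ns - 0).toNat = 0 := by omega
    rw [h0]
    simp
  · subst h
    simp
  · have hr : 0 ≤ PySem.Int.mod nl ns := PySem.Int.mod_nonneg nl h
    rw [pv_fold_closed (PySem.Int.floordiv nl ns) (PySem.Int.mod nl ns) hr]

-- ===== VERDICT (by name: the statement is the Claim_ definition above) =====
theorem assign_layers_to_stages_spec : Claim_equal_assign_layers_to_stages := by
  intro num_layers num_stages strategy _ hpre
  unfold Spec_assign_layers_to_stages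
  rcases hpre.1 with h | h <;> subst h
  · exact pv_uniform_eq _ _
  · rw [assign_layers_to_stages, assign_layers_to_stages_alt]
    rw [if_neg (by decide : ¬("memory_balanced" = "uniform")), if_pos rfl, if_pos rfl]
    exact pv_uniform_eq _ _
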